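-- pv_equiv track=rewrite | github.com/AnthonyDeluca718/Algorithms | chap-03/programs/p25.py | all_characters
-- ===== SOURCE A (Python) =====
-- def all_characters(string, text):
--   counts = {}
--   total = len(string)
--   for char in string:
--     if (char in counts):
--       counts[char] = counts[char] + 1
--     else:
--       counts[char] = 1
--
--   for char in text:
--     if (char in counts and counts[char] > 0):
--       counts[char] = counts[char] - 1
--       total = total - 1
--     if (total == 0):
--       break
--
--   return total == 0
-- ===== SOURCE B (Python) =====
-- def all_characters(string, text):
--     need = {}
--     for ch in string:
--         need[ch] = need.get(ch, 0) + 1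
--     have = {}
--     for ch in text:
--         have[ch] = have.get(ch, 0) + 1
--     return all(cnt <= have.get(ch, 0) for ch, cnt in need.items())
-- ===== Notes on version B (the rewrite author's own statement) =====
-- stated objective: alternative
-- what changed: Replaces A's decrementing scan over text with a running total and early break by building frequency tables of BOTH strings once and checking multiset containment with a single comparison pass.
import Mathlib
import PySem

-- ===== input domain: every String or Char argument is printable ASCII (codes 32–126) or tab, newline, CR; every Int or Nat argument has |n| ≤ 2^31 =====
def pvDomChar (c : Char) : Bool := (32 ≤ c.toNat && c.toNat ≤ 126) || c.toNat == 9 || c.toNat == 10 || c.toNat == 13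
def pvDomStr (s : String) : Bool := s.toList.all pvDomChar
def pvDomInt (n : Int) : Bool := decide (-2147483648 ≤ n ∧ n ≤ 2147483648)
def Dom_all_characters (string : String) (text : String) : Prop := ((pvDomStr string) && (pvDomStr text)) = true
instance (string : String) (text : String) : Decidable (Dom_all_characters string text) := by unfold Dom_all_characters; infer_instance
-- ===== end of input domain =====

-- B replaces A's decrementing scan with early break by two frequency tables and a containment pass (alternative decomposition, same cost).

-- ===== PORT A =====
-- the second 'for char in text' loop of A, with its early 'break' when total hits 0
def pvTextLoop : List Char → PySem.Dict Char Int → Int → Int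
  | [], _, total => total
  | c :: cs, counts, total =>
      let p : PySem.Dict Char Int × Int :=
        if counts.contains c && decide (0 < counts.getD c 0)
        then (counts.insert c (counts.getD c 0 - 1), total - 1)
        else (counts, total)
      if p.2 == 0 then p.2 else pvTextLoop cs p.1 p.2

def all_characters (string : String) (text : String) : Bool :=
  -- counts[char] under the 'char in counts' guard is counts.getD char 0
  let counts : PySem.Dict Char Int := string.toList.foldl
    (fun d c => if d.contains c then d.insert c (d.getD c 0 + 1) else d.insert c 1)
    PySem.Dict.empty
  let total := pvTextLoop text.toList counts (string.toList.length : Int)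
  total == 0

-- ===== PORT B =====
def all_characters_alt (string : String) (text : String) : Bool :=
  let need : PySem.Dict Char Int :=
    string.toList.foldl (fun d c => d.insert c (d.getD c 0 + 1)) PySem.Dict.empty
  let hav : PySem.Dict Char Int :=
    text.toList.foldl (fun d c => d.insert c (d.getD c 0 + 1)) PySem.Dict.empty
  need.items.all (fun p => decide (p.2 ≤ hav.getD p.1 0))

-- ===== PRECONDITION & SPEC =====
def Spec_all_characters (string : String) (text : String) (out : Bool) : Prop := out = all_characters_alt string text
instance (string : String) (text : String) (out : Bool) : Decidable (Spec_all_characters string text out) := by unfold Spec_all_characters; infer_instance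

-- ===== CLAIM (what is proved, stated in full; the proofs are below) =====
def Claim_equal_all_characters : Prop := ∀ (string : String) (text : String), Dom_all_characters string text → Spec_all_characters string text (all_characters string text)

-- ===== LEMMAS AND PROOFS =====

-- the two branch shapes of A's text loop
theorem pvTextLoop_cons_pos (c : Char) (cs : List Char) (d : PySem.Dict Char Int) (total : Int)
    (h : (d.contains c && decide (0 < d.getD c 0)) = true) :
    pvTextLoop (c :: cs) d total =
      if total - 1 = 0 then total - 1 else pvTextLoop cs (d.insert c (d.getD c 0 - 1)) (total - 1) := by
  simp only [pvTextLoop, h, if_true, beq_iff_eq]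

theorem pvTextLoop_cons_neg (c : Char) (cs : List Char) (d : PySem.Dict Char Int) (total : Int)
    (h : (d.contains c && decide (0 < d.getD c 0)) = false) :
    pvTextLoop (c :: cs) d total = if total = 0 then total else pvTextLoop cs d total := by
  simp only [pvTextLoop, h, Bool.false_eq_true, if_false, beq_iff_eq]

-- a list of nonnegative integers summing to zero is all zero
theorem pv_sum_zero {l : List Int} (hnn : ∀ x ∈ l, 0 ≤ x) (hz : l.sum = 0) :
    ∀ x ∈ l, x = 0 := by
  induction l with
  | nil => intro x hx; cases hx
  | cons a l ih =>
      have hns : 0 ≤ l.sum := List.sum_nonneg (fun x hx => hnn x (List.mem_cons_of_mem _ hx))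
      have ha : 0 ≤ a := hnn a List.mem_cons_self
      simp only [List.sum_cons] at hz
      intro x hx
      rcases List.mem_cons.1 hx with h | h
      · omega
      · exact ih (fun y hy => hnn y (List.mem_cons_of_mem _ hy)) (by omega) x h

-- updating one entry of a duplicate-free index list changes the map-sum by the difference
theorem pv_sum_map_update {l : List Char} (hnd : l.Nodup) {k : Char} (hk : k ∈ l)
    (f g : Char → Int) (hoff : ∀ x ∈ l, x ≠ k → f x = g x) :
    (l.map f).sum = (l.map g).sum + f k - g k := by
  induction l with
  | nil => cases hk
  | cons a l ih =>
      simp only [List.map_cons, List.sum_cons]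
      rcases List.mem_cons.1 hk with rfl | hk'
      · have : ∀ x ∈ l, f x = g x := by
          intro x hx
          exact hoff x (List.mem_cons_of_mem _ hx) (fun h => (List.nodup_cons.1 hnd).1 (h ▸ hx))
        rw [List.map_congr_left this]; ring
      · have ha : f a = g a := by
          refine hoff a List.mem_cons_self (fun h => ?_)
          exact (List.nodup_cons.1 hnd).1 (h ▸ hk')
        rw [ih (List.nodup_cons.1 hnd).2 hk'
          (fun x hx hne => hoff x (List.mem_cons_of_mem _ hx) hne), ha]
        ring

-- the dict's value-sum via its keys
theorem pv_values_sum (d : PySem.Dict Char Int) (hnd : d.keys.Nodup) :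
    d.values.sum = (d.keys.map (fun k => d.getD k 0)).sum := by
  rw [PySem.Dict.values_eq_map_keys d hnd 0]

-- zero value-sum forces every lookup to zero
theorem pv_all_zero (d : PySem.Dict Char Int) (hnd : d.keys.Nodup)
    (hnn : ∀ k, 0 ≤ d.getD k 0) (hz : d.values.sum = 0) :
    ∀ k, d.getD k 0 = 0 := by
  intro k
  by_cases hk : k ∈ d.keys
  · have := pv_sum_zero (l := d.keys.map (fun k => d.getD k 0))
      (by intro x hx; rcases List.mem_map.1 hx with ⟨a, _, rfl⟩; exact hnn a)
      (by rw [← pv_values_sum d hnd]; exact hz)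
    exact this _ (List.mem_map.2 ⟨k, hk, rfl⟩)
  · exact PySem.Dict.getD_of_not_contains d 0
      (by rw [PySem.Dict.contains_eq_decide_mem_keys]; simp [hk])

-- all lookups zero forces zero value-sum
theorem pv_sum_of_all_zero (d : PySem.Dict Char Int) (hnd : d.keys.Nodup)
    (h0 : ∀ k, d.getD k 0 = 0) : d.values.sum = 0 := by
  rw [pv_values_sum d hnd, List.map_congr_left (fun x _ => h0 x)]
  simp

-- characterization of A's text loop: it ends at zero iff text covers every residual count
theorem pv_textLoop_iff (ts : List Char) (d : PySem.Dict Char Int) (total : Int)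
    (hnd : d.keys.Nodup) (hnn : ∀ k, 0 ≤ d.getD k 0) (hsum : total = d.values.sum) :
    (pvTextLoop ts d total = 0) ↔ ∀ c, d.getD c 0 ≤ (ts.count c : Int) := by
  induction ts generalizing d total with
  | nil =>
      simp only [pvTextLoop, List.count_nil, Nat.cast_zero]
      constructor
      · intro h c
        exact le_of_eq (pv_all_zero d hnd hnn (by rw [← hsum]; exact h) c)
      · intro h
        rw [hsum]
        exact pv_sum_of_all_zero d hnd (fun k => le_antisymm (h k) (hnn k))
  | cons c cs ih =>
      by_cases hc : d.contains c = true ∧ 0 < d.getD c 0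
      · -- matched: decrement and count down
        have hcontains : d.contains c = true := hc.1
        have hmem : c ∈ d.keys := (PySem.Dict.contains_iff_mem_keys d c).1 hcontains
        set d' := d.insert c (d.getD c 0 - 1) with hd'
        have hkeys : d'.keys = d.keys := PySem.Dict.keys_insert_of_contains d _ hcontains
        have hnd' : d'.keys.Nodup := by rw [hkeys]; exact hnd
        have hgetD' : ∀ k, d'.getD k 0 = if k = c then d.getD c 0 - 1 else d.getD k 0 := by
          intro k; rw [hd', PySem.Dict.getD_insert]
        have hnn' : ∀ k, 0 ≤ d'.getD k 0 := by
          intro k; rw [hgetD' k]; split_ifs with h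
          · omega
          · exact hnn k
        have hsum' : total - 1 = d'.values.sum := by
          rw [pv_values_sum d' hnd', hkeys,
            pv_sum_map_update hnd hmem (fun k => d'.getD k 0) (fun k => d.getD k 0)
              (fun x _ hne => by simp only [hgetD' x, if_neg hne]),
            ← pv_values_sum d hnd]
          simp only [hgetD' c, if_true]
          omega
        have hiff : (∀ k, d'.getD k 0 ≤ (cs.count k : Int)) ↔
            (∀ k, d.getD k 0 ≤ ((c :: cs).count k : Int)) := by
          constructor
          · intro h k
            have := h k; rw [hgetD' k] at this
            by_cases hkc : k = c
            · subst hkc; rw [if_pos rfl] at this; rw [List.count_cons_self]; push_cast; omega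
            · rw [if_neg hkc] at this; rw [List.count_cons_of_ne (Ne.symm hkc)]; exact this
          · intro h k
            have := h k; rw [hgetD' k]
            by_cases hkc : k = c
            · subst hkc; rw [List.count_cons_self] at this; rw [if_pos rfl]
              push_cast at this ⊢; omega
            · rw [List.count_cons_of_ne (Ne.symm hkc)] at this; rw [if_neg hkc]; exact this
        rw [pvTextLoop_cons_pos c cs d total (by rw [hcontains]; simp [hc.2])]
        by_cases hz : total - 1 = 0
        · rw [if_pos hz]
          have hall : ∀ k, d'.getD k 0 = 0 :=
            pv_all_zero d' hnd' hnn' (by rw [← hsum']; exact hz)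
          constructor
          · intro _
            exact hiff.1 (fun k => by rw [hall k]; exact Int.natCast_nonneg _)
          · intro _; exact hz
        · rw [if_neg hz, ih d' (total - 1) hnd' hnn' hsum']
          exact hiff
      · -- not matched: state unchanged
        have hcond : (d.contains c && decide (0 < d.getD c 0)) = false := by
          by_cases h1 : d.contains c = true
          · have : ¬ 0 < d.getD c 0 := fun h2 => hc ⟨h1, h2⟩
            simp [h1, this]
          · simp [Bool.eq_false_iff.2 h1]
        have hc0 : d.getD c 0 = 0 := by
          by_cases h1 : d.contains c = true
          · have h2 : ¬ 0 < d.getD c 0 := fun h2 => hc ⟨h1, h2⟩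
            have := hnn c; omega
          · exact PySem.Dict.getD_of_not_contains d 0 (Bool.eq_false_iff.2 h1)
        have hiff : (∀ k, d.getD k 0 ≤ (cs.count k : Int)) ↔
            (∀ k, d.getD k 0 ≤ ((c :: cs).count k : Int)) := by
          constructor
          · intro h k
            by_cases hkc : k = c
            · subst hkc; rw [List.count_cons_self]; push_cast; have := h k; omega
            · rw [List.count_cons_of_ne (Ne.symm hkc)]; exact h k
          · intro h k
            by_cases hkc : k = c
            · subst hkc; rw [hc0]; exact Int.natCast_nonneg _
            · have := h k; rwa [List.count_cons_of_ne (Ne.symm hkc)] at this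
        rw [pvTextLoop_cons_neg c cs d total hcond]
        by_cases hz : total = 0
        · rw [if_pos hz]
          have hall : ∀ k, d.getD k 0 = 0 :=
            pv_all_zero d hnd hnn (by rw [← hsum]; exact hz)
          constructor
          · intro _
            exact hiff.1 (fun k => by rw [hall k]; exact Int.natCast_nonneg _)
          · intro _; exact hz
        · rw [if_neg hz, ih d total hnd hnn hsum]
          exact hiff

-- A's first loop builds exactly the counter of string
theorem pv_build_eq_counter (l : List Char) :
    l.foldl (fun d c => if d.contains c then d.insert c (d.getD c 0 + 1) else d.insert c 1)
      PySem.Dict.empty = PySem.Dict.counter l := by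
  rw [← PySem.Dict.foldl_insert_getD_add_one_eq_counter]
  congr 1
  funext d c
  by_cases h : d.contains c = true
  · rw [if_pos h]
  · rw [if_neg (by simp [h]),
      PySem.Dict.getD_of_not_contains d 0 (Bool.eq_false_iff.2 h)]
    norm_num

-- the counter's value-sum is the list's length
theorem pv_counter_sum (l : List Char) :
    (PySem.Dict.counter l).values.sum = (l.length : Int) := by
  rw [pv_values_sum _ (PySem.Dict.nodup_keys_counter l), PySem.Dict.keys_counter]
  have hperm : (PySem.Set.ofList l).Perm l.dedup := by
    refine (List.perm_ext_iff_of_nodup (PySem.Set.nodup_ofList l) l.nodup_dedup).2 ?_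
    intro x; rw [PySem.Set.mem_ofList, List.mem_dedup]
  rw [(hperm.map (fun k => (PySem.Dict.counter l).getD k 0)).sum_eq,
    List.map_congr_left (fun x _ => PySem.Dict.getD_counter l x),
    ← List.sum_map_count_dedup_eq_length l, Nat.cast_list_sum, List.map_map]
  rfl

-- B's value as a containment statement over all characters
theorem pv_alt_iff (string text : String) :
    all_characters_alt string text = true ↔
      ∀ c, (string.toList.count c : Int) ≤ (text.toList.count c : Int) := by
  unfold all_characters_alt
  dsimp only
  rw [PySem.Dict.foldl_insert_getD_add_one_eq_counter, PySem.Dict.items_counter]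
  simp only [List.all_map, List.all_eq_true, PySem.Set.mem_ofList, Function.comp,
    decide_eq_true_eq]
  constructor
  · intro h c
    by_cases hc : c ∈ string.toList
    · have := h c hc
      rwa [PySem.Dict.getD_foldl_insert_add_one, PySem.Dict.getD_empty, zero_add] at this
    · rw [List.count_eq_zero_of_not_mem hc]
      exact le_trans (by norm_num) (Int.natCast_nonneg _)
  · intro h c _
    rw [PySem.Dict.getD_foldl_insert_add_one, PySem.Dict.getD_empty, zero_add]
    exact h c

-- A's value as the same containment statement
theorem pv_a_iff (string text : String) :
    all_characters string text = true ↔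
      ∀ c, (string.toList.count c : Int) ≤ (text.toList.count c : Int) := by
  unfold all_characters
  rw [pv_build_eq_counter]
  simp only [beq_iff_eq]
  have hnn : ∀ k, 0 ≤ (PySem.Dict.counter string.toList).getD k 0 := by
    intro k; rw [PySem.Dict.getD_counter]; exact Int.natCast_nonneg _
  rw [pv_textLoop_iff text.toList (PySem.Dict.counter string.toList) _
    (PySem.Dict.nodup_keys_counter string.toList) hnn (pv_counter_sum string.toList).symm]
  constructor
  · intro h c; have := h c; rwa [PySem.Dict.getD_counter] at this
  · intro h c; rw [PySem.Dict.getD_counter]; exact h c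

-- ===== VERDICT (by name: the statement is the Claim_ definition above) =====
theorem all_characters_spec : Claim_equal_all_characters := by
  intro string text _
  unfold Spec_all_characters
  have h := (pv_a_iff string text).trans (pv_alt_iff string text).symm
  cases h1 : all_characters string text <;> cases h2 : all_characters_alt string text <;>
    simp [h1, h2] at h ⊢
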